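-- pv_equiv track=rewrite | github.com/cdoss3/project-euler | python/problem_021.py | amicable_test
-- ===== SOURCE A (Python) =====
-- def proper_divisors(num):
--     divisors = []
--
--     for k in range(1, (num // 2) + 1):
--         if num % k == 0:
--             divisors.append(k)
--
--     if len(divisors) == 1:
--         return None
--
--     return divisors
--
-- def amicable_test(num1, num2):
--     # If either number is prime, abort
--     if proper_divisors(num1) == None or proper_divisors(num2) == None or num1 == num2:
--         return False
--     else:
--         sum1 = 0
--         sum2 = 0
--
--         for number in proper_divisors(num1):
--             sum1 += number
--         for number in proper_divisors(num2):
--             sum2 += number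
--
--         if sum1 == num2 and sum2 == num1:
--             return True
--         else:
--             return False
-- ===== SOURCE B (Python) =====
-- def _spd(n):
--     # sum of proper divisors via sqrt divisor-pair enumeration; 0 for n <= 1
--     if n <= 1:
--         return 0
--     total = 1
--     i = 2
--     while i * i <= n:
--         if n % i == 0:
--             j = n // i
--             total += i
--             if j != i:
--                 total += j
--         i += 1
--     return total
--
-- def amicable_test(num1, num2):
--     return num1 != num2 and _spd(num1) == num2 and _spd(num2) == num1
-- ===== Notes on version B (the rewrite author's own statement) =====
-- stated objective: faster
-- what changed: B sums proper divisors by enumerating divisor pairs up to sqrt(n) in one pass (no list, one call per argument), instead of A's O(n) trial loop that rebuilds the full divisor list up to three times per argument; A's explicit prime/equal aborts are subsumed by the sum comparison.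
import Mathlib
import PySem

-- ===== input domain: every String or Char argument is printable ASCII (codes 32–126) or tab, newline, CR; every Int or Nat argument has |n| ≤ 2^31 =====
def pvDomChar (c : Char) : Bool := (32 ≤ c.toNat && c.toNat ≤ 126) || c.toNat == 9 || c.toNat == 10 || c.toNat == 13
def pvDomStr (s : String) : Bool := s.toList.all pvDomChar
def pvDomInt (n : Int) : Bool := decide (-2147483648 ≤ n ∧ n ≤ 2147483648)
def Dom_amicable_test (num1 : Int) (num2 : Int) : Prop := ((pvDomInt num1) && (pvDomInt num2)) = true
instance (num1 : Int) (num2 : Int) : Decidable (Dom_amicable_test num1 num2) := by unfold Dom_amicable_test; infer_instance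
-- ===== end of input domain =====

-- B replaces A's linear trial-division loop (re-run up to three times per argument) by a single
-- divisor-pair enumeration up to sqrt(n) per argument; return values are provably identical.


-- ===== PORT A =====
def proper_divisors (num : Int) : Option (List Int) :=
  let divisors : List Int :=
    (PySem.List.pyRange 1 (PySem.Int.floordiv num 2 + 1) 1).foldl
      (fun acc k => if PySem.Int.mod num k == 0 then acc ++ [k] else acc) []
  if divisors.length == 1 then none else some divisors

def amicable_test (num1 : Int) (num2 : Int) : Bool :=
  if (proper_divisors num1).isNone || (proper_divisors num2).isNone || num1 == num2 then
    false
  else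
    let sum1 := ((proper_divisors num1).getD []).foldl (fun acc number => acc + number) 0
    let sum2 := ((proper_divisors num2).getD []).foldl (fun acc number => acc + number) 0
    if sum1 == num2 && sum2 == num1 then true else false

-- ===== PORT B =====
-- the `while i * i <= n:` loop of Source B's _spd
def pvSpdLoop (n : Int) (i : Int) (total : Int) : Int :=
  if i * i ≤ n then
    pvSpdLoop n (i + 1)
      (if PySem.Int.mod n i == 0 then
         (let j := PySem.Int.floordiv n i
          if j ≠ i then total + i + j else total + i)
       else total)
  else total
termination_by (n + 1 - i).toNat
decreasing_by
  have hin : i ≤ n := by nlinarith [mul_self_nonneg i]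
  omega

def pvSpd (n : Int) : Int :=
  if n ≤ 1 then 0 else pvSpdLoop n 2 1

def amicable_test_alt (num1 : Int) (num2 : Int) : Bool :=
  num1 != num2 && pvSpd num1 == num2 && pvSpd num2 == num1

-- ===== PRECONDITION & SPEC =====
def Spec_amicable_test (num1 : Int) (num2 : Int) (out : Bool) : Prop := out = amicable_test_alt num1 num2
instance (num1 : Int) (num2 : Int) (out : Bool) : Decidable (Spec_amicable_test num1 num2 out) := by unfold Spec_amicable_test; infer_instance

-- ===== CLAIM (what is proved, stated in full; the proofs are below) =====
def Claim_equal_amicable_test : Prop := ∀ (num1 : Int) (num2 : Int), Dom_amicable_test num1 num2 → Spec_amicable_test num1 num2 (amicable_test num1 num2)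

-- ===== LEMMAS AND PROOFS =====

-- A's divisor list, extracted (the `let` inside proper_divisors)
def pvDivList (num : Int) : List Int :=
  (PySem.List.pyRange 1 (PySem.Int.floordiv num 2 + 1) 1).foldl
    (fun acc k => if PySem.Int.mod num k == 0 then acc ++ [k] else acc) []

theorem pvDivList_eq_filter (num : Int) :
    pvDivList num = (PySem.List.pyRange 1 (PySem.Int.floordiv num 2 + 1) 1).filter
      (fun k => PySem.Int.mod num k == 0) := by
  unfold pvDivList
  exact PySem.List.foldl_append_if_eq_filter _ _ _

theorem proper_divisors_def (num : Int) :
    proper_divisors num = if (pvDivList num).length == 1 then none else some (pvDivList num) :=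
  rfl

theorem pvDivList_nil (n : Int) (h : n ≤ 1) : pvDivList n = [] := by
  rw [pvDivList_eq_filter, PySem.List.pyRange_one_eq_nil, List.filter_nil]
  have := (PySem.Int.floordiv_lt_iff_lt_mul (a := n) (b := 2) (q := 1) (by norm_num)).2 (by omega)
  omega

-- contribution of loop index i in B
def pvF (m i : Nat) : Nat := if i ∣ m then i + (if m / i ≠ i then m / i else 0) else 0

-- the sqrt-pair enumeration sums all divisors (the core of B's correctness)
theorem pv_sqrt_sum (m : Nat) (hm : 1 ≤ m) :
    ∑ i ∈ Finset.Ico 1 (Nat.sqrt m + 1), pvF m i = ∑ d ∈ m.divisors, d := by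
  have hset : Finset.filter (· ∣ m) (Finset.Ico 1 (Nat.sqrt m + 1))
      = m.divisors.filter (fun d => d * d ≤ m) := by
    ext d
    simp [Finset.mem_Ico, Nat.mem_divisors, Nat.le_sqrt]
    constructor
    · rintro ⟨⟨h1, h2⟩, hd⟩
      exact ⟨⟨hd, by omega⟩, h2⟩
    · rintro ⟨⟨hd, _⟩, h2⟩
      exact ⟨⟨Nat.pos_of_dvd_of_pos hd (by omega), h2⟩, hd⟩
  have hbij : ∑ d ∈ m.divisors.filter (fun d => d * d < m), m / d
      = ∑ d ∈ m.divisors.filter (fun d => ¬ d * d ≤ m), d := by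
    apply Finset.sum_nbij' (fun d => m / d) (fun d => m / d)
    · intro a ha
      simp only [Finset.mem_filter, Nat.mem_divisors] at ha ⊢
      obtain ⟨⟨hd, hm0⟩, hlt⟩ := ha
      have ha0 : 0 < a := Nat.pos_of_dvd_of_pos hd (by omega)
      have heq : a * (m / a) = m := Nat.mul_div_cancel' hd
      refine ⟨⟨Nat.div_dvd_of_dvd hd, hm0⟩, ?_⟩
      intro hle
      nlinarith [Nat.div_le_self m a]
    · intro a ha
      simp only [Finset.mem_filter, Nat.mem_divisors] at ha ⊢
      obtain ⟨⟨hd, hm0⟩, hgt⟩ := ha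
      push Not at hgt
      have ha0 : 0 < a := Nat.pos_of_dvd_of_pos hd (by omega)
      have heq : a * (m / a) = m := Nat.mul_div_cancel' hd
      have hq0 : 0 < m / a := Nat.div_pos (Nat.le_of_dvd (by omega) hd) ha0
      refine ⟨⟨Nat.div_dvd_of_dvd hd, hm0⟩, ?_⟩
      nlinarith
    · intro a ha
      simp only [Finset.mem_filter, Nat.mem_divisors] at ha
      exact Nat.div_div_self ha.1.1 ha.1.2
    · intro a ha
      simp only [Finset.mem_filter, Nat.mem_divisors] at ha
      exact Nat.div_div_self ha.1.1 ha.1.2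
    · intro a ha; rfl
  have key : ∑ i ∈ Finset.Ico 1 (Nat.sqrt m + 1), pvF m i
      = ∑ d ∈ m.divisors, (if d * d ≤ m then d else 0)
        + ∑ d ∈ m.divisors, (if d * d < m then m / d else 0) := by
    calc ∑ i ∈ Finset.Ico 1 (Nat.sqrt m + 1), pvF m i
        = ∑ i ∈ Finset.filter (· ∣ m) (Finset.Ico 1 (Nat.sqrt m + 1)),
            (i + (if m / i ≠ i then m / i else 0)) := by
          rw [Finset.sum_filter]; rfl
      _ = ∑ d ∈ m.divisors.filter (fun d => d * d ≤ m),
            (d + (if m / d ≠ d then m / d else 0)) := by rw [hset]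
      _ = ∑ d ∈ m.divisors, (if d * d ≤ m then d + (if m / d ≠ d then m / d else 0) else 0) := by
          rw [Finset.sum_filter]
      _ = ∑ d ∈ m.divisors, ((if d * d ≤ m then d else 0) + (if d * d < m then m / d else 0)) := by
          apply Finset.sum_congr rfl
          intro d hd
          simp only [Nat.mem_divisors] at hd
          have heq : d * (m / d) = m := Nat.mul_div_cancel' hd.1
          have hd0 : 0 < d := Nat.pos_of_dvd_of_pos hd.1 (by omega)
          by_cases h1 : d * d ≤ m
          · rcases Nat.lt_or_ge (d * d) m with h2 | h2
            · have hne : m / d ≠ d := by intro he; rw [he] at heq; omega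
              simp [h1, h2, hne]
            · have hdm : d * d = m := by omega
              have he : m / d = d := by nlinarith [Nat.div_le_self m d]
              simp [he, hdm]
          · have h2 : ¬ d * d < m := by omega
            simp [h1, h2]
      _ = _ := Finset.sum_add_distrib
  rw [key]
  have split : ∑ d ∈ m.divisors, d
      = ∑ d ∈ m.divisors, (if d * d ≤ m then d else 0)
        + ∑ d ∈ m.divisors, (if ¬ d * d ≤ m then d else 0) := by
    rw [← Finset.sum_add_distrib]
    apply Finset.sum_congr rfl
    intro d hd
    by_cases h : d * d ≤ m <;> simp [h]
  rw [split]
  congr 1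
  calc ∑ d ∈ m.divisors, (if d * d < m then m / d else 0)
      = ∑ d ∈ m.divisors.filter (fun d => d * d < m), m / d := (Finset.sum_filter _ _).symm
    _ = ∑ d ∈ m.divisors.filter (fun d => ¬ d * d ≤ m), d := hbij
    _ = ∑ d ∈ m.divisors, (if ¬ d * d ≤ m then d else 0) := Finset.sum_filter _ _

-- B's whole computation on m ≥ 2, in Nat terms
theorem pv_central (m : Nat) (hm : 2 ≤ m) :
    1 + ∑ i ∈ Finset.Ico 2 (Nat.sqrt m + 1), pvF m i = ∑ d ∈ m.properDivisors, d := by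
  have hs1 : 1 ≤ Nat.sqrt m := by
    have := Nat.sqrt_pos.2 (by omega : 0 < m); omega
  have hbot : ∑ i ∈ Finset.Ico 1 (Nat.sqrt m + 1), pvF m i
      = pvF m 1 + ∑ i ∈ Finset.Ico 2 (Nat.sqrt m + 1), pvF m i :=
    Finset.sum_eq_sum_Ico_succ_bot (by omega) _
  have hF1 : pvF m 1 = 1 + m := by simp [pvF]; omega
  have hprop := Nat.sum_divisors_eq_sum_properDivisors_add_self (n := m)
  have := pv_sqrt_sum m (by omega)
  omega

-- A's whole computation on m ≥ 1, in Nat terms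
theorem pv_Aside (m : Nat) (hm : 1 ≤ m) :
    ∑ k ∈ Finset.Ico 1 (m / 2 + 1), (if k ∣ m then k else 0) = ∑ d ∈ m.properDivisors, d := by
  have hset : Finset.filter (· ∣ m) (Finset.Ico 1 (m / 2 + 1)) = m.properDivisors := by
    ext d
    simp [Nat.mem_properDivisors, Finset.mem_Ico]
    constructor
    · rintro ⟨⟨h1, h2⟩, hd⟩
      exact ⟨hd, by omega⟩
    · rintro ⟨hd, hlt⟩
      have hd0 : 0 < d := Nat.pos_of_dvd_of_pos hd (by omega)
      have : d ≤ m / 2 := by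
        rcases hd with ⟨c, rfl⟩
        have hc : 2 ≤ c := by
          rcases Nat.lt_or_ge c 2 with h | h
          · interval_cases c <;> omega
          · exact h
        exact Nat.le_div_iff_mul_le (by norm_num) |>.2 (by nlinarith)
      exact ⟨⟨hd0, by omega⟩, hd⟩
  rw [← hset, Finset.sum_filter]

-- list-filter sum = Finset Ico sum (A-side glue)
theorem pv_glue (m N : Nat) :
    (((List.range N).map (fun k : Nat => 1 + (k : Int))).filter
        (fun k => PySem.Int.mod (m:Int) k == 0)).sum
      = ((∑ k ∈ Finset.Ico 1 (N + 1), (if k ∣ m then k else 0) : Nat) : Int) := by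
  induction N with
  | zero => simp
  | succ t ih =>
    rw [List.range_succ, List.map_append, List.filter_append, List.sum_append,
      Finset.sum_Ico_succ_top (by omega : 1 ≤ t + 1), Nat.cast_add, ih]
    congr 1
    have hcast : (t:Int) + 1 = ((t+1 : Nat) : Int) := by push_cast; ring
    by_cases hd : (t + 1) ∣ m
    · have hb : (PySem.Int.mod (m:Int) ((t:Int) + 1) == 0) = true := by
        simp only [beq_iff_eq, PySem.Int.mod_eq_zero_iff_dvd, hcast]
        exact_mod_cast hd
      rw [List.map_singleton, show (1:Int) + (t:Int) = (t:Int) + 1 from by ring]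
      simp only [List.filter, hb, if_pos hd]
      push_cast
      simp
    · have hb : (PySem.Int.mod (m:Int) ((t:Int) + 1) == 0) = false := by
        simp only [beq_eq_false_iff_ne, ne_eq, PySem.Int.mod_eq_zero_iff_dvd, hcast]
        exact_mod_cast hd
      rw [List.map_singleton, show (1:Int) + (t:Int) = (t:Int) + 1 from by ring]
      simp only [List.filter, hb, if_neg hd]
      simp

-- A's list sum as a Finset sum
theorem pv_listsum (m : Nat) :
    (pvDivList (m : Int)).foldl (fun acc number => acc + number) 0
      = ((∑ k ∈ Finset.Ico 1 (m / 2 + 1), (if k ∣ m then k else 0) : Nat) : Int) := by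
  rw [pvDivList_eq_filter]
  have hflo : PySem.Int.floordiv (m:Int) 2 = ((m/2 : Nat) : Int) := by
    exact_mod_cast PySem.Int.floordiv_natCast m 2
  rw [hflo, PySem.List.pyRange_one]
  have ht : (((m/2:Nat):Int) + 1 - 1).toNat = m/2 := by omega
  rw [ht, PySem.List.foldl_add (g := fun x => x)]
  simp only [zero_add, List.map_id']
  exact pv_glue m (m/2)

-- B's loop as a Finset sum
theorem pv_loop_aux (m : Nat) : ∀ (k : Nat) (i total : Int), 1 ≤ i →
    Nat.sqrt m + 1 - i.toNat = k →
    pvSpdLoop (m : Int) i total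
      = total + ((∑ j ∈ Finset.Ico i.toNat (Nat.sqrt m + 1), pvF m j : Nat) : Int) := by
  intro k
  induction k with
  | zero =>
    intro i total hi hk
    obtain ⟨a, rfl⟩ : ∃ a : Nat, (a:Int) = i := ⟨i.toNat, by omega⟩
    rw [pvSpdLoop, if_neg, Finset.Ico_eq_empty (by simp at hk ⊢; omega)]
    · simp
    · intro hle
      have h2 : a * a ≤ m := by exact_mod_cast hle
      have := Nat.le_sqrt.mpr h2
      simp at hk
      omega
  | succ t ih =>
    intro i total hi hk
    obtain ⟨a, rfl⟩ : ∃ a : Nat, (a:Int) = i := ⟨i.toNat, by omega⟩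
    simp only [Int.toNat_natCast] at hk ⊢
    have hle : ((a:Int)) * a ≤ (m : Int) := by
      have h2 : a * a ≤ m := Nat.le_sqrt.mp (by omega)
      exact_mod_cast h2
    rw [pvSpdLoop, if_pos hle]
    have hrec := ih ((a:Int) + 1) (if PySem.Int.mod (m:Int) (a:Int) == 0 then
         (let j := PySem.Int.floordiv (m:Int) (a:Int)
          if j ≠ (a:Int) then total + (a:Int) + j else total + (a:Int))
       else total) (by omega) (by omega)
    rw [hrec]
    have htn : ((a:Int) + 1).toNat = a + 1 := by omega
    rw [htn]
    have hsplit : ∑ j ∈ Finset.Ico a (Nat.sqrt m + 1), pvF m j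
        = pvF m a + ∑ j ∈ Finset.Ico (a + 1) (Nat.sqrt m + 1), pvF m j :=
      Finset.sum_eq_sum_Ico_succ_bot (by omega) _
    rw [hsplit]
    have hbody : (if PySem.Int.mod (m:Int) (a:Int) == 0 then
         (let j := PySem.Int.floordiv (m:Int) (a:Int)
          if j ≠ (a:Int) then total + (a:Int) + j else total + (a:Int))
       else total) = total + ((pvF m a : Nat) : Int) := by
      by_cases hd : a ∣ m
      · have hmod : (PySem.Int.mod (m:Int) (a:Int) == 0) = true := by
          simp only [beq_iff_eq, PySem.Int.mod_eq_zero_iff_dvd]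
          exact_mod_cast hd
        have hdiv : PySem.Int.floordiv (m:Int) (a:Int) = ((m / a : Nat) : Int) :=
          PySem.Int.floordiv_natCast m a
        by_cases hne : m / a = a
        · simp only [hmod, if_true, hdiv]
          simp [pvF, hd, hne]
        · have hne' : ((m / a : Nat) : Int) ≠ (a : Int) := by
            intro hc; exact hne (by exact_mod_cast hc)
          simp only [hmod, if_true, hdiv, if_pos hne']
          simp only [pvF, if_pos hd, if_pos hne]
          push_cast
          ring
      · have hmod : (PySem.Int.mod (m:Int) (a:Int) == 0) = false := by
          simp only [beq_eq_false_iff_ne, ne_eq, PySem.Int.mod_eq_zero_iff_dvd]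
          intro hc
          exact hd (by exact_mod_cast hc)
        simp only [hmod, Bool.false_eq_true, if_false]
        simp [pvF, hd]
    rw [hbody]
    push_cast
    ring

theorem pv_loop (m : Nat) (i total : Int) (hi : 1 ≤ i) :
    pvSpdLoop (m : Int) i total
      = total + ((∑ j ∈ Finset.Ico i.toNat (Nat.sqrt m + 1), pvF m j : Nat) : Int) :=
  pv_loop_aux m (Nat.sqrt m + 1 - i.toNat) i total hi rfl

-- master lemma: sum of A's list equals B's pvSpd, for every integer input
theorem pvSum_eq_spd (n : Int) :
    (pvDivList n).foldl (fun acc number => acc + number) 0 = pvSpd n := by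
  by_cases h : n ≤ 1
  · rw [pvDivList_nil n h]
    simp [pvSpd, h]
  · replace h : 1 < n := by omega
    have hm2 : 2 ≤ n.toNat := by omega
    have hn : (n.toNat : Int) = n := by omega
    rw [← hn, pv_listsum, pv_Aside _ (by omega), ← pv_central _ hm2]
    have : pvSpd ((n.toNat : Int)) = pvSpdLoop (n.toNat : Int) 2 1 := by
      unfold pvSpd
      rw [if_neg (by omega)]
    rw [this, pv_loop _ _ _ (by norm_num)]
    push_cast
    norm_num

-- when A returns None (exactly one proper divisor found), n ≥ 2 and the list is [1]
theorem pvNone_cases (n : Int) (h : (pvDivList n).length = 1) :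
    2 ≤ n ∧ pvDivList n = [1] := by
  have hn2 : 2 ≤ n := by
    by_contra hc
    rw [pvDivList_nil n (by omega)] at h
    simp at h
  refine ⟨hn2, ?_⟩
  obtain ⟨a, ha⟩ := List.length_eq_one_iff.mp h
  have hmem : (1 : Int) ∈ pvDivList n := by
    rw [pvDivList_eq_filter]
    rw [List.mem_filter]
    constructor
    · rw [PySem.List.mem_pyRange_one]
      have : 1 ≤ PySem.Int.floordiv n 2 :=
        (PySem.Int.le_floordiv_iff_mul_le (by norm_num)).2 (by omega)
      omega
    · simp
  rw [ha] at hmem ⊢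
  simp at hmem
  rw [hmem]

theorem pvSpd_one : pvSpd 1 = 0 := rfl

-- ===== VERDICT (by name: the statement is the Claim_ definition above) =====
theorem amicable_test_spec : Claim_equal_amicable_test := by
  intro num1 num2 _
  unfold Spec_amicable_test
  show amicable_test num1 num2 = amicable_test_alt num1 num2
  unfold amicable_test amicable_test_alt
  by_cases h1 : (pvDivList num1).length = 1
  · obtain ⟨hn2, hlist⟩ := pvNone_cases num1 h1
    have hpd : (proper_divisors num1).isNone = true := by
      rw [proper_divisors_def, if_pos (by simpa using h1)]
      rfl
    rw [hpd]
    have hspd1 : pvSpd num1 = 1 := by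
      rw [← pvSum_eq_spd, hlist]
      rfl
    simp only [Bool.true_or, if_true]
    by_cases hq : num2 = 1
    · subst hq
      have : (pvSpd 1 == num1) = false := by
        rw [pvSpd_one]
        simp
        omega
      rw [this, Bool.and_false]
    · have : (pvSpd num1 == num2) = false := by
        rw [hspd1]
        simp
        omega
      rw [this, Bool.and_false, Bool.false_and]
  · by_cases h2 : (pvDivList num2).length = 1
    · obtain ⟨hn2, hlist⟩ := pvNone_cases num2 h2
      have hpd : (proper_divisors num2).isNone = true := by
        rw [proper_divisors_def, if_pos (by simpa using h2)]
        rfl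
      rw [hpd]
      have hspd2 : pvSpd num2 = 1 := by
        rw [← pvSum_eq_spd, hlist]
        rfl
      simp only [Bool.or_true, Bool.true_or, if_true]
      by_cases hq : num1 = 1
      · subst hq
        have : (pvSpd 1 == num2) = false := by
          rw [pvSpd_one]
          simp
          omega
        rw [this]
        simp
      · have : (pvSpd num2 == num1) = false := by
          rw [hspd2]
          simp
          omega
        rw [this, Bool.and_false]
    · have hpd1 : (proper_divisors num1).isNone = false := by
        rw [proper_divisors_def, if_neg (by simpa using h1)]
        rfl
      have hpd2 : (proper_divisors num2).isNone = false := by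
        rw [proper_divisors_def, if_neg (by simpa using h2)]
        rfl
      have hget1 : (proper_divisors num1).getD [] = pvDivList num1 := by
        rw [proper_divisors_def, if_neg (by simpa using h1)]
        rfl
      have hget2 : (proper_divisors num2).getD [] = pvDivList num2 := by
        rw [proper_divisors_def, if_neg (by simpa using h2)]
        rfl
      rw [hpd1, hpd2]
      by_cases he : num1 = num2
      · subst he
        simp
      · have hne : (num1 == num2) = false := by simp [he]
        have hbne : (num1 != num2) = true := by simp [he]
        rw [hne, hbne, hget1, hget2, pvSum_eq_spd, pvSum_eq_spd]
        cases hc : (pvSpd num1 == num2 && pvSpd num2 == num1) <;> simp [hc]
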